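-- pv_equiv track=rewrite | github.com/lsy999999999/BaiRong | src/researcher/report_generation/writing_process/report_section_base.py | extract_section_outline
-- ===== SOURCE A (Python) =====
-- def extract_section_outline(report_outline: str, section_title: str) -> str:
--     """
--     Extract the outline for a specific section from the complete report outline.
--
--     Args:
--         report_outline (str): Complete report outline.
--         section_title (str): Title of the section to extract.
--
--     Returns:
--         str: Extracted section outline content.
--     """
--     lines = report_outline.split('\n')
--     section_content = []
--     in_section = False
--     next_section_pattern = "##"  # Assume subsections are marked with ##
--
--     for line in lines:
--         # Detect section start
--         if line.strip().startswith("## ") and section_title.lower() in line.lower():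
--             in_section = True
--             section_content.append(line)
--             continue
--
--         # Detect section end (next section at same level starts)
--         if in_section and line.strip().startswith("## "):
--             break
--
--         # Collect section content
--         if in_section:
--             section_content.append(line)
--
--     return '\n'.join(section_content)
-- ===== SOURCE B (Python) =====
-- def extract_section_outline(report_outline: str, section_title: str) -> str:
--     """Two-stage approach: first collect the positions of all '## ' headers,
--     then pick the section of the first header containing the title; the section
--     runs from its header up to the next header (or the end of the document)."""
--     lines = report_outline.split('\n')
--     headers = [i for i, line in enumerate(lines) if line.strip().startswith('## ')]
--     title = section_title.lower()
--     for k, i in enumerate(headers):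
--         if title in lines[i].lower():
--             end = headers[k + 1] if k + 1 < len(headers) else len(lines)
--             return '\n'.join(lines[i:end])
--     return ''
-- ===== Notes on version B (the rewrite author's own statement) =====
-- stated objective: alternative
-- what changed: B first collects the positions of all '## ' header lines, then returns the block between the first title-matching header and the next header, instead of A's single stateful scan with an in_section flag and accumulator; B also ends the section at ANY following same-level header (see differs).
-- intended difference: On documents where the first '## ' header after the matching one also contains the title, A's start-detection branch re-fires and it returns the merged run of matching sections, while B returns just the first section, which is the intended 'extract the outline for a specific section' (a same-level header always starts a new section). — e.g. on extract_section_outline("## a\nx\n## ab\ny\n## c\nz", "a"): A returns "## a\nx\n## ab\ny", B returns "## a\nx"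
import Mathlib
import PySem

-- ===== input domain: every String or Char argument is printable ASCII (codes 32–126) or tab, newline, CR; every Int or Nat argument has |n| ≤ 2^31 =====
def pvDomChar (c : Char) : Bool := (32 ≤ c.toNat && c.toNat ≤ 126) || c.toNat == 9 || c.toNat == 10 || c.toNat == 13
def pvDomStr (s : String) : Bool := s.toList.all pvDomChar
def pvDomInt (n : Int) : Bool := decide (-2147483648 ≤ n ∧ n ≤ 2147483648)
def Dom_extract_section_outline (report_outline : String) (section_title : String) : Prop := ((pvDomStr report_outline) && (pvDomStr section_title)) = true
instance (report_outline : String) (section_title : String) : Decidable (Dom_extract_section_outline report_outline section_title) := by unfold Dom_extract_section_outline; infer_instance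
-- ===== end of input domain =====

-- B replaces A's stateful flag-scan by a two-stage plan (collect all header positions, then pick the matching section between consecutive headers); on documents where the header right after the matching one also contains the title, A runs on past it while B ends the section there (D_ below).


-- ===== PORT A =====
-- line.strip().startswith("## ")
def pvHdr (l : String) : Bool := PySem.Str.startswith (PySem.Str.strip l) "## "
-- line.strip().startswith("## ") and section_title.lower() in line.lower()
def pvHit (t l : String) : Bool := pvHdr l && PySem.Str.isIn (PySem.Str.lower t) (PySem.Str.lower l)

-- A's for-loop: state = (section_content, in_section); 'break' returns the accumulator.
def pvLoopA (t : String) (acc : List String) (inSec : Bool) : List String → List String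
  | [] => acc
  | l :: ls =>
    if pvHit t l then pvLoopA t (acc ++ [l]) true ls
    else if inSec && pvHdr l then acc
    else if inSec then pvLoopA t (acc ++ [l]) inSec ls
    else pvLoopA t acc inSec ls

def extract_section_outline (report_outline : String) (section_title : String) : String :=
  let lines := (PySem.Str.split? report_outline "\n").getD []   -- sep is the nonempty literal '\n', so split? is always some
  PySem.Str.join "\n" (pvLoopA section_title [] false lines)

-- ===== PORT B =====
-- headers = [i for i, line in enumerate(lines) if line.strip().startswith('## ')]
def pvHeaders (lines : List String) : List Int :=
  (PySem.List.enumerate lines 0).filterMap (fun p => if pvHdr p.2 then some p.1 else none)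

-- for k, i in enumerate(headers): if title in lines[i].lower(): end = …; return '\n'.join(lines[i:end])
def pvLoopB (t : String) (lines : List String) (headers : List Int) : List (Int × Int) → String
  | [] => ""
  | (k, i) :: rest =>
    if PySem.Str.isIn (PySem.Str.lower t) (PySem.Str.lower (PySem.List.pyGetD lines i "")) then
      -- i comes from enumerate(lines), so lines[i] is in range; pyGetD is exact there
      let e : Int := if k + 1 < PySem.List.len headers then PySem.List.pyGetD headers (k + 1) 0 else PySem.List.len lines
      PySem.Str.join "\n" (PySem.List.slice lines (some i) (some e))
    else pvLoopB t lines headers rest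

def extract_section_outline_alt (report_outline : String) (section_title : String) : String :=
  let lines := (PySem.Str.split? report_outline "\n").getD []   -- sep is the nonempty literal '\n', so split? is always some
  let headers := pvHeaders lines
  pvLoopB section_title lines headers (PySem.List.enumerate headers 0)

-- ===== PRECONDITION & SPEC =====
-- On documents where the first '## ' header after the matching one ALSO contains the title, A keeps
-- collecting through it (its start-detection branch re-fires) and returns the merged sections, while B
-- ends the section at that header and returns only the first section — the intended reading of
-- 'extract the outline for a specific section' (a same-level header always starts a new section).
def D_extract_section_outline (report_outline : String) (section_title : String) : Prop :=
  (((((PySem.Str.split? report_outline "\n").getD []).dropWhile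
      (fun l => !pvHit section_title l)).tail.find? pvHdr).any (pvHit section_title)) = true
instance (report_outline : String) (section_title : String) : Decidable (D_extract_section_outline report_outline section_title) := by unfold D_extract_section_outline; infer_instance

def Spec_extract_section_outline (report_outline : String) (section_title : String) (out : String) : Prop := ¬ D_extract_section_outline report_outline section_title → out = extract_section_outline_alt report_outline section_title
instance (report_outline : String) (section_title : String) (out : String) : Decidable (Spec_extract_section_outline report_outline section_title out) := by unfold Spec_extract_section_outline; infer_instance

def pvDiffWitness_extract_section_outline : String × String := ("## a\nx\n## ab\ny\n## c\nz", "a")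
def pvDiffWitnessOut_extract_section_outline : String × String := ("## a\nx\n## ab\ny", "## a\nx")

-- ===== CLAIM (what is proved, stated in full; the proofs are below) =====
def Claim_unchanged_extract_section_outline : Prop := ∀ (report_outline : String) (section_title : String), Dom_extract_section_outline report_outline section_title → Spec_extract_section_outline report_outline section_title (extract_section_outline report_outline section_title)
def Claim_changed_extract_section_outline : Prop := Dom_extract_section_outline (pvDiffWitness_extract_section_outline.1) (pvDiffWitness_extract_section_outline.2) ∧ D_extract_section_outline (pvDiffWitness_extract_section_outline.1) (pvDiffWitness_extract_section_outline.2) ∧ extract_section_outline (pvDiffWitness_extract_section_outline.1) (pvDiffWitness_extract_section_outline.2) = pvDiffWitnessOut_extract_section_outline.1 ∧ extract_section_outline_alt (pvDiffWitness_extract_section_outline.1) (pvDiffWitness_extract_section_outline.2) = pvDiffWitnessOut_extract_section_outline.2 ∧ pvDiffWitnessOut_extract_section_outline.1 ≠ pvDiffWitnessOut_extract_section_outline.2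
def Claim_exact_extract_section_outline : Prop := ∀ (report_outline : String) (section_title : String), Dom_extract_section_outline report_outline section_title → D_extract_section_outline report_outline section_title → extract_section_outline report_outline section_title ≠ extract_section_outline_alt report_outline section_title


-- ===== LEMMAS AND PROOFS =====

-- proof-side only: the condition on which A's loop breaks (a header line that does not re-match the title)
def pvEndp (t l : String) : Bool := pvHdr l && !(PySem.Str.isIn (PySem.Str.lower t) (PySem.Str.lower l))

-- once in the section, A collects lines up to (excluding) the first breaking header
theorem pvLoopA_true (t : String) : ∀ (ls : List String) (acc : List String),
    pvLoopA t acc true ls = acc ++ ls.take ((ls.findIdx? (fun l => pvEndp t l)).getD ls.length) := by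
  intro ls
  induction ls with
  | nil => intro acc; simp [pvLoopA]
  | cons l ls ih =>
    intro acc
    rw [List.findIdx?_cons]
    by_cases he : pvEndp t l = true
    · have he' := he
      simp only [pvEndp, Bool.and_eq_true, Bool.not_eq_true'] at he'
      have h2c : PySem.Chars.isIn (PySem.Chars.lower t.toList) (PySem.Chars.lower l.toList) = false := by
        simpa using he'.2
      have hhit : pvHit t l = false := by simp [pvHit, he'.1, h2c]
      simp [pvLoopA, hhit, he'.1, he]
    · have hstep : pvLoopA t acc true (l :: ls) = pvLoopA t (acc ++ [l]) true ls := by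
        by_cases hh : pvHit t l = true
        · simp [pvLoopA, hh]
        · have hhdr : pvHdr l = false := by
            cases h1 : pvHdr l with
            | false => rfl
            | true =>
              cases h2 : PySem.Chars.isIn (PySem.Chars.lower t.toList) (PySem.Chars.lower l.toList) with
              | false => exact absurd (by simp [pvEndp, h1, h2]) he
              | true => exact absurd (by simp [pvHit, h1, h2]) hh
          simp [pvLoopA, hh, hhdr]
      rw [hstep, ih]
      have : ∀ k : Nat, acc ++ (l :: ls).take (k + 1) = (acc ++ [l]) ++ ls.take k := by
        intro k; simp
      simp only [he, if_neg, Bool.false_eq_true, not_false_iff]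
      cases h : ls.findIdx? (fun l => pvEndp t l) with
      | none => simp
      | some j => simp

-- A's whole loop: empty if no header matches, else the lines from the first matching header
-- up to the first breaking header after it
theorem pvLoopA_char (t : String) : ∀ ls : List String,
    pvLoopA t [] false ls =
      match ls.findIdx? (fun l => pvHit t l) with
      | none => []
      | some s => (ls.drop s).take (1 + (((ls.drop (s + 1)).findIdx? (fun l => pvEndp t l)).getD (ls.drop (s + 1)).length)) := by
  intro ls
  induction ls with
  | nil => simp [pvLoopA]
  | cons l ls ih =>
    rw [List.findIdx?_cons]
    by_cases hh : pvHit t l = true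
    · rw [show pvLoopA t [] false (l :: ls) = pvLoopA t [l] true ls by simp [pvLoopA, hh]]
      rw [pvLoopA_true]
      simp [hh, List.take_succ_cons, Nat.add_comm 1]
    · rw [show pvLoopA t [] false (l :: ls) = pvLoopA t [] false ls by simp [pvLoopA, hh]]
      rw [ih]
      simp only [hh, Bool.false_eq_true, if_false]
      cases h : ls.findIdx? (fun l => pvHit t l) with
      | none => simp
      | some j => simp


-- the change region, restated through findIdx? (the shape the main proofs use)
theorem dropWhile_char (t : String) : ∀ ls : List String,
    ls.dropWhile (fun l => !pvHit t l) =
      match ls.findIdx? (fun l => pvHit t l) with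
      | none => []
      | some s => ls.drop s := by
  intro ls
  induction ls with
  | nil => simp
  | cons l ls ih =>
    rw [List.findIdx?_cons]
    by_cases hh : pvHit t l = true
    · simp [hh]
    · rw [List.dropWhile_cons]
      simp only [hh, Bool.not_false, if_true, Bool.false_eq_true, if_false, ih]
      cases hf : ls.findIdx? (fun l => pvHit t l) with
      | none => simp
      | some j => simp

theorem findHdr_char (t : String) : ∀ ls : List String,
    (ls.find? pvHdr).any (pvHit t) =
      match ls.findIdx? pvHdr with
      | none => false
      | some m => pvHit t (ls.getD m "") := by
  intro ls
  induction ls with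
  | nil => simp
  | cons l ls ih =>
    rw [List.findIdx?_cons, List.find?_cons]
    by_cases hh : pvHdr l = true
    · simp [hh]
    · simp only [hh, Bool.false_eq_true, if_false, ih]
      cases hf : ls.findIdx? pvHdr with
      | none => simp
      | some j => simp

-- proof-side only: what B's inner loop computes from the header list (first header containing
-- the title, paired with the following header position if any)
def pvPick (t : String) (lines : List String) : List Int → Option (Int × Option Int)
  | [] => none
  | i :: rest =>
    if PySem.Str.isIn (PySem.Str.lower t) (PySem.Str.lower (PySem.List.pyGetD lines i "")) then
      some (i, rest.head?)
    else pvPick t lines rest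

def pvHF (ls : List String) (n : Nat) : List Int :=
  (PySem.List.enumerate ls (n : Int)).filterMap (fun p => if pvHdr p.2 then some p.1 else none)

theorem pvHF_head (ls : List String) : ∀ n : Nat,
    (pvHF ls n).head? = (ls.findIdx? pvHdr).map (fun m => ((n + m : Nat) : Int)) := by
  induction ls with
  | nil => intro n; simp [pvHF, PySem.List.enumerate_nil]
  | cons l ls ih =>
    intro n
    rw [List.findIdx?_cons]
    by_cases h : pvHdr l = true
    · simp [pvHF, PySem.List.enumerate_cons, h]
    · have : pvHF (l :: ls) n = pvHF ls (n + 1) := by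
        simp [pvHF, PySem.List.enumerate_cons, h]
      rw [this, ih (n + 1)]
      simp only [h, Bool.false_eq_true, if_false]
      cases hf : ls.findIdx? pvHdr with
      | none => simp
      | some m => simp; ring


-- B's headers are exactly (pvHF lines 0), and the pick over it is the first matching header index
set_option maxHeartbeats 1000000 in
theorem pvPick_char (t : String) (lines : List String) : ∀ (suffix : List String) (n : Nat),
    lines.drop n = suffix →
    pvPick t lines (pvHF suffix n) =
      match suffix.findIdx? (fun l => pvHit t l) with
      | none => none
      | some j => some (((n + j : Nat) : Int),
          ((suffix.drop (j + 1)).findIdx? pvHdr).map (fun m => ((n + j + 1 + m : Nat) : Int))) := by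
  intro suffix
  induction suffix with
  | nil => intro n h; simp [pvHF, PySem.List.enumerate_nil, pvPick]
  | cons l ls ih =>
    intro n h
    have hln : lines[n]? = some l := by
      rw [← List.head?_drop, h]; rfl
    have hdrop : lines.drop (n + 1) = ls := by
      have h2 := congrArg (List.drop 1) h
      simpa [List.drop_drop, Nat.add_comm] using h2
    have hgetD : lines.getD n "" = l := by
      simp [List.getD_eq_getElem?_getD, hln]
    rw [List.findIdx?_cons]
    by_cases hhd : pvHdr l = true
    · have hHF : pvHF (l :: ls) n = (n : Int) :: pvHF ls (n + 1) := by
        simp [pvHF, PySem.List.enumerate_cons, hhd]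
      rw [hHF]
      by_cases hin : PySem.Str.isIn (PySem.Str.lower t) (PySem.Str.lower l) = true
      · have hhit : pvHit t l = true := by simp [pvHit, hhd]; simpa using hin
        have hpick : pvPick t lines ((n : Int) :: pvHF ls (n + 1)) = some ((n : Int), (pvHF ls (n + 1)).head?) := by
          simp only [pvPick, PySem.List.pyGetD_natCast, hgetD]
          rw [if_pos hin]
        rw [hpick, pvHF_head, hhit]
        simp
      · have hhit : pvHit t l = false := by
          simp [pvHit]; intro _; simpa using hin
        have hpick : pvPick t lines ((n : Int) :: pvHF ls (n + 1)) = pvPick t lines (pvHF ls (n + 1)) := by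
          simp only [pvPick, PySem.List.pyGetD_natCast, hgetD]
          rw [if_neg hin]
        rw [hpick, ih (n + 1) hdrop]
        simp only [hhit, Bool.false_eq_true, if_false]
        cases hf : ls.findIdx? (fun l => pvHit t l) with
        | none => simp
        | some j =>
          have e1 : n + 1 + j = n + (j + 1) := by omega
          have e2 : ∀ m : Nat, n + 1 + j + 1 + m = n + (j + 1) + 1 + m := by omega
          simp only [Option.map_some, List.drop_succ_cons, e1]
        
    · have hHF : pvHF (l :: ls) n = pvHF ls (n + 1) := by
        simp [pvHF, PySem.List.enumerate_cons, hhd]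
      have hhit : pvHit t l = false := by simp [pvHit, hhd]
      rw [hHF, ih (n + 1) hdrop]
      simp only [hhit, Bool.false_eq_true, if_false]
      cases hf : ls.findIdx? (fun l => pvHit t l) with
      | none => simp
      | some j =>
        have e1 : n + 1 + j = n + (j + 1) := by omega
        have e2 : ∀ m : Nat, n + 1 + j + 1 + m = n + (j + 1) + 1 + m := by omega
        simp only [Option.map_some, List.drop_succ_cons, e1]


-- B's inner loop, run on the enumerated header suffix, computes pvPick of that suffix
theorem pvLoopB_char (t : String) (lines : List String) (headers : List Int) :
    ∀ (hs : List Int) (n : Nat), headers.drop n = hs →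
    pvLoopB t lines headers (PySem.List.enumerate hs (n : Int)) =
      match pvPick t lines hs with
      | none => ""
      | some (i, nxt) => PySem.Str.join "\n" (PySem.List.slice lines (some i) (some (nxt.getD (PySem.List.len lines)))) := by
  intro hs
  induction hs with
  | nil => intro n h; simp [PySem.List.enumerate_nil, pvLoopB, pvPick]
  | cons i rest ih =>
    intro n h
    have hdrop : headers.drop (n + 1) = rest := by
      have h2 := congrArg (List.drop 1) h
      simpa [List.drop_drop, Nat.add_comm] using h2
    rw [PySem.List.enumerate_cons]
    by_cases hin : PySem.Str.isIn (PySem.Str.lower t) (PySem.Str.lower (PySem.List.pyGetD lines i "")) = true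
    · have he : (if (n : Int) + 1 < PySem.List.len headers then PySem.List.pyGetD headers ((n : Int) + 1) 0 else PySem.List.len lines)
             = (rest.head?).getD (PySem.List.len lines) := by
        cases hr : rest with
        | nil =>
          have hle : headers.length ≤ n + 1 := by
            rw [← List.drop_eq_nil_iff, hdrop, hr]
          rw [if_neg (by simp [PySem.List.len_eq]; omega)]
          simp
        | cons r rs =>
          have hlt : n + 1 < headers.length := by
            have hne : headers.drop (n + 1) ≠ [] := by rw [hdrop, hr]; simp
            rw [ne_eq, List.drop_eq_nil_iff] at hne; omega
          have hcast : ((n : Int) + 1) = ((n + 1 : Nat) : Int) := by push_cast; ring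
          have hget : PySem.List.pyGetD headers ((n : Int) + 1) 0 = r := by
            rw [hcast, PySem.List.pyGetD_natCast]
            simp [List.getD_eq_getElem?_getD, ← List.head?_drop, hdrop, hr]
          rw [if_pos (by rw [PySem.List.len_eq]; exact_mod_cast hlt), hget]
          simp
      simp only [pvLoopB, hin, if_true, pvPick, he]
    · have hcast : ((n : Int) + 1) = ((n + 1 : Nat) : Int) := by push_cast; ring
      simp only [pvLoopB, hin, Bool.false_eq_true, if_false, pvPick, hcast]
      exact ih (n + 1) hdrop


-- strictly more parts under a nonempty separator make a strictly longer join
theorem join_len_lt (sep : List Char) (hsep : 0 < sep.length) :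
    ∀ (xs : List (List Char)) (y : List Char) (ys : List (List Char)), xs ≠ [] →
    (PySem.Chars.join sep xs).length < (PySem.Chars.join sep (xs ++ y :: ys)).length := by
  intro xs
  induction xs with
  | nil => intro y ys h; exact absurd rfl h
  | cons x xs ih =>
    intro y ys _
    cases xs with
    | nil =>
      rw [PySem.Chars.join_singleton, List.singleton_append, PySem.Chars.join_cons_cons]
      simp only [List.length_append]
      omega
    | cons x' rest =>
      rw [show (x :: x' :: rest) ++ y :: ys = x :: x' :: (rest ++ y :: ys) from rfl,
          PySem.Chars.join_cons_cons, PySem.Chars.join_cons_cons]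
      have := ih y ys (by simp)
      rw [show (x' :: rest) ++ y :: ys = x' :: (rest ++ y :: ys) from rfl] at this
      simp only [List.length_append]
      omega

-- ===== VERDICT (by name: the statements are the Claim_ definitions above) =====
theorem extract_section_outline_spec : Claim_unchanged_extract_section_outline := by
  unfold Claim_unchanged_extract_section_outline
  intro r t _
  unfold Spec_extract_section_outline
  intro hD
  simp only [D_extract_section_outline] at hD
  rw [dropWhile_char t] at hD
  show PySem.Str.join "\n" (pvLoopA t [] false ((PySem.Str.split? r "\n").getD [])) =
    pvLoopB t ((PySem.Str.split? r "\n").getD []) (pvHeaders ((PySem.Str.split? r "\n").getD []))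
      (PySem.List.enumerate (pvHeaders ((PySem.Str.split? r "\n").getD [])) 0)
  set lines := (PySem.Str.split? r "\n").getD [] with hl
  rw [pvLoopA_char]
  have hH : pvHeaders lines = pvHF lines 0 := by
    simp [pvHeaders, pvHF]
  rw [hH, show (0 : Int) = ((0 : Nat) : Int) from by norm_num,
      pvLoopB_char t lines (pvHF lines 0) (pvHF lines 0) 0 rfl,
      pvPick_char t lines lines 0 rfl]
  cases hs : lines.findIdx? (fun l => pvHit t l) with
  | none => simp; decide
  | some s =>
    simp only [hs, List.tail_drop] at hD
    rw [findHdr_char t] at hD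
    obtain ⟨hslt, -, -⟩ := List.findIdx?_eq_some_iff_getElem.mp hs
    simp only [Nat.zero_add]
    cases hm : (lines.drop (s + 1)).findIdx? pvHdr with
    | none =>
      have hend : (lines.drop (s + 1)).findIdx? (fun l => pvEndp t l) = none := by
        rw [List.findIdx?_eq_none_iff]
        intro x hx
        have := List.findIdx?_eq_none_iff.mp hm x hx
        simp [pvEndp, this]
      simp only [hm] at hD
      simp only [hend, Option.getD_none, Option.map_none]
      rw [PySem.List.len_eq, PySem.List.slice_natCast]
      have : lines.length - s = 1 + (lines.drop (s + 1)).length := by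
        simp [List.length_drop]; omega
      rw [this]
    | some m =>
      simp only [hm] at hD
      obtain ⟨hmlt, hmhdr, hmfst⟩ := List.findIdx?_eq_some_iff_getElem.mp hm
      have hgetD : (lines.drop (s + 1)).getD m "" = (lines.drop (s + 1))[m] := by
        simp [List.getD_eq_getElem?_getD, List.getElem?_eq_getElem hmlt]
      rw [hgetD] at hD
      simp only [Bool.not_eq_true] at hD
      have hend : (lines.drop (s + 1)).findIdx? (fun l => pvEndp t l) = some m := by
        rw [List.findIdx?_eq_some_iff_getElem]
        refine ⟨hmlt, ?_, ?_⟩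
        · simp only [pvEndp, hmhdr, Bool.true_and, Bool.not_eq_true']
          have hDf := hD
          simp only [pvHit, hmhdr, Bool.true_and] at hDf
          exact hDf
        · intro j hj
          have := hmfst j hj
          simp only [pvEndp, Bool.and_eq_true, Bool.not_eq_true] at this ⊢
          intro hc
          exact absurd hc.1 (by simpa using this)
      simp only [hend, Option.getD_some, Option.map_some]
      rw [PySem.List.slice_natCast]
      have : s + 1 + m - s = 1 + m := by omega
      rw [this]

theorem extract_section_outline_changed : Claim_changed_extract_section_outline := by unfold Claim_changed_extract_section_outline; decide

theorem extract_section_outline_tight : Claim_exact_extract_section_outline := by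
  unfold Claim_exact_extract_section_outline
  intro r t _ hD
  simp only [D_extract_section_outline] at hD
  rw [dropWhile_char t] at hD
  show PySem.Str.join "\n" (pvLoopA t [] false ((PySem.Str.split? r "\n").getD [])) ≠
    pvLoopB t ((PySem.Str.split? r "\n").getD []) (pvHeaders ((PySem.Str.split? r "\n").getD []))
      (PySem.List.enumerate (pvHeaders ((PySem.Str.split? r "\n").getD [])) 0)
  set lines := (PySem.Str.split? r "\n").getD [] with hl
  rw [pvLoopA_char]
  have hH : pvHeaders lines = pvHF lines 0 := by
    simp [pvHeaders, pvHF]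
  rw [hH, show (0 : Int) = ((0 : Nat) : Int) from by norm_num,
      pvLoopB_char t lines (pvHF lines 0) (pvHF lines 0) 0 rfl,
      pvPick_char t lines lines 0 rfl]
  cases hs : lines.findIdx? (fun l => pvHit t l) with
  | none => rw [hs] at hD; simp at hD
  | some s =>
    simp only [hs, List.tail_drop] at hD
    rw [findHdr_char t] at hD
    obtain ⟨hslt, -, -⟩ := List.findIdx?_eq_some_iff_getElem.mp hs
    simp only [Nat.zero_add]
    cases hm : (lines.drop (s + 1)).findIdx? pvHdr with
    | none => rw [hm] at hD; simp at hD
    | some m =>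
      simp only [hm] at hD
      obtain ⟨hmlt, hmhdr, hmfst⟩ := List.findIdx?_eq_some_iff_getElem.mp hm
      have hgetD : (lines.drop (s + 1)).getD m "" = (lines.drop (s + 1))[m] := by
        simp [List.getD_eq_getElem?_getD, List.getElem?_eq_getElem hmlt]
      rw [hgetD] at hD
      -- the first header after the hit is itself a hit, so A's break point lies strictly beyond it
      have hix : PySem.Str.isIn (PySem.Str.lower t) (PySem.Str.lower (lines.drop (s + 1))[m]) = true := by
        simp only [pvHit, Bool.and_eq_true] at hD
        exact hD.2
      have hendm : pvEndp t (lines.drop (s + 1))[m] = false := by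
        simp only [pvEndp, hmhdr, Bool.true_and, Bool.not_eq_false']
        exact hix
      have heA : m < ((lines.drop (s + 1)).findIdx? (fun l => pvEndp t l)).getD (lines.drop (s + 1)).length := by
        cases he : (lines.drop (s + 1)).findIdx? (fun l => pvEndp t l) with
        | none => simpa using hmlt
        | some e' =>
          obtain ⟨helt, heend, hefst⟩ := List.findIdx?_eq_some_iff_getElem.mp he
          simp only [Option.getD_some]
          rcases Nat.lt_trichotomy e' m with hlt | heq | hgt
          · have hj := hmfst e' hlt
            simp only [pvEndp, Bool.and_eq_true] at heend
            exact absurd heend.1 hj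
          · subst heq; rw [hendm] at heend; exact absurd heend (by simp)
          · exact hgt
      simp only [Option.getD_some, Option.map_some]
      rw [PySem.List.slice_natCast]
      have harith : s + 1 + m - s = m + 1 := by omega
      rw [harith]
      -- A's list = B's list ++ a nonempty remainder
      set eA := ((lines.drop (s + 1)).findIdx? (fun l => pvEndp t l)).getD (lines.drop (s + 1)).length with heAdef
      have heAle : eA ≤ (lines.drop (s + 1)).length := by
        rw [heAdef]
        cases he : (lines.drop (s + 1)).findIdx? (fun l => pvEndp t l) with
        | none => simp
        | some e' =>
          obtain ⟨helt, -, -⟩ := List.findIdx?_eq_some_iff_getElem.mp he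
          simp only [Option.getD_some]; omega
      have heA' : m < eA := heA
      have hsplit : (1 : Nat) + eA = (m + 1) + (eA - m) := by omega
      rw [hsplit, List.take_add]
      have hlen2 : (lines.drop s).length = 1 + (lines.drop (s + 1)).length := by
        simp [List.length_drop]; omega
      have hextra : ((lines.drop s).drop (m + 1)).take (eA - m) ≠ [] := by
        have h1 : (lines.drop s).drop (m + 1) ≠ [] := by
          rw [ne_eq, List.drop_eq_nil_iff, hlen2]
          omega
        rw [ne_eq, List.take_eq_nil_iff]
        push Not
        exact ⟨by omega, h1⟩
      have hB : ((lines.drop s).take (m + 1)) ≠ [] := by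
        have h1 : lines.drop s ≠ [] := by
          rw [ne_eq, List.drop_eq_nil_iff]
          omega
        rw [ne_eq, List.take_eq_nil_iff]
        push Not
        exact ⟨by omega, h1⟩
      intro heq
      have heq2 := congrArg String.toList heq
      rw [PySem.Str.toList_join, PySem.Str.toList_join, List.map_append] at heq2
      obtain ⟨z, zs, hz⟩ := List.exists_cons_of_ne_nil hextra
      rw [hz, List.map_cons] at heq2
      have hlt := join_len_lt ("\n".toList) (by decide)
        (((lines.drop s).take (m + 1)).map String.toList) z.toList (zs.map String.toList)
        (by simpa using hB)
      rw [heq2] at hlt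
      exact absurd hlt (by omega)
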